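-- pv_equiv track=rewrite | github.com/2023ct05030/LLM_ETL_UI | langgraph_etl_workflow.py | _remove_conflicting_config
-- ===== SOURCE A (Python) =====
-- def _remove_conflicting_config(script: str) -> str:
--     """Remove existing configuration that might conflict with injection"""
--     lines = script.split('\n')
--     cleaned_lines = []
--     skip_block = False
--     brace_count = 0
--
--     for line in lines:
--         stripped = line.strip()
--
--         # Start skipping if we find conflicting config definitions
--         if (stripped.startswith('AWS_CONFIG') or stripped.startswith('SNOWFLAKE_CONFIG') or
--             stripped.startswith('CONFIG_VALID') or 'validate_config' in stripped):
--             skip_block = True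
--             brace_count = 0
--             continue
--
--         if skip_block:
--             # Count braces to know when a dictionary definition ends
--             brace_count += line.count('{') - line.count('}')
--
--             # If we're not in a dict/block anymore and this is a new statement
--             if brace_count <= 0 and stripped and not stripped.startswith('#'):
--                 if (stripped.startswith('def ') or stripped.startswith('class ') or
--                     stripped.startswith('if ') or stripped.startswith('import ') or
--                     stripped.startswith('from ') or (not stripped.endswith(':') and '=' in stripped)):
--                     skip_block = False
--                     cleaned_lines.append(line)
--             continue
--
--         cleaned_lines.append(line)
--
--     return '\n'.join(cleaned_lines)
-- ===== SOURCE B (Python) =====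
-- def _is_trigger(stripped):
--     return (stripped.startswith('AWS_CONFIG') or stripped.startswith('SNOWFLAKE_CONFIG')
--             or stripped.startswith('CONFIG_VALID') or 'validate_config' in stripped)
--
--
-- def _is_terminator(stripped):
--     return bool(stripped) and not stripped.startswith('#') and (
--         stripped.startswith('def ') or stripped.startswith('class ') or
--         stripped.startswith('if ') or stripped.startswith('import ') or
--         stripped.startswith('from ') or (not stripped.endswith(':') and '=' in stripped))
--
--
-- def _split_at_triggers(lines):
--     """Segments of lines delimited by trigger lines (the triggers themselves dropped)."""
--     segments = [[]]
--     for line in lines: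
--         if _is_trigger(line.strip()):
--             segments.append([])
--         else:
--             segments[-1].append(line)
--     return segments
--
--
-- def _kept_suffix(segment):
--     """For a segment that follows a trigger: the suffix starting at the first line
--     that closes all braces and begins a new statement; [] if there is none."""
--     balance = 0
--     for j, line in enumerate(segment):
--         balance += line.count('{') - line.count('}')
--         if balance <= 0 and _is_terminator(line.strip()):
--             return segment[j:]
--     return []
--
--
-- def _remove_conflicting_config(script: str) -> str:
--     segments = _split_at_triggers(script.split('\n'))
--     out = segments[0]
--     for segment in segments[1:]:
--         out += _kept_suffix(segment)
--     return '\n'.join(out)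
-- ===== Notes on version B (the rewrite author's own statement) =====
-- stated objective: alternative
-- what changed: Replaces A's single-pass state machine (skip_block flag + brace_count threaded across iterations) with a staged decomposition: split the line list into segments delimited by trigger lines, emit the first segment whole, and for each following segment keep only the suffix from its first brace-closing new-statement line; no skipping state crosses segment boundaries.
import Mathlib
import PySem

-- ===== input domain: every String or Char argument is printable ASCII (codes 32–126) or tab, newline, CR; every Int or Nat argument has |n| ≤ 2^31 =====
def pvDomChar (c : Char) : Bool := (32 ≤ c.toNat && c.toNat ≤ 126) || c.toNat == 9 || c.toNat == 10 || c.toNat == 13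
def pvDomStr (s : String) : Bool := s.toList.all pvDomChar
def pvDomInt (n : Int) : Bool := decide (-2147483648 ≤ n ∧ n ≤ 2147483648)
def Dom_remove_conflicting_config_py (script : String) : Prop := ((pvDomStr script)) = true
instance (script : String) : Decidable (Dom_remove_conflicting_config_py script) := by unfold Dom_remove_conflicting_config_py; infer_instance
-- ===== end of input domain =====

-- B replaces A's single-pass skip_block/brace_count state machine by a staged decomposition
-- (split at trigger lines, then keep a per-segment suffix); same cost, alternative structure.

-- ===== PORT A =====
-- literal transliteration of A's for-loop: state (acc = cleaned_lines, skip = skip_block, brace = brace_count)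
def pvLoopA : List (List Char) → List (List Char) → Bool → Int → List (List Char)
  | [], acc, _, _ => acc
  | line :: rest, acc, skip, brace =>
    let stripped := PySem.Chars.strip line
    if PySem.Chars.startswith stripped "AWS_CONFIG".toList ||
       PySem.Chars.startswith stripped "SNOWFLAKE_CONFIG".toList ||
       PySem.Chars.startswith stripped "CONFIG_VALID".toList ||
       PySem.Chars.isIn "validate_config".toList stripped then
      pvLoopA rest acc true 0
    else if skip then
      let brace' := brace + (PySem.Chars.count line "{".toList : Int) - (PySem.Chars.count line "}".toList : Int)
      if decide (brace' ≤ 0) && !(stripped == []) && !(PySem.Chars.startswith stripped "#".toList) &&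
         (PySem.Chars.startswith stripped "def ".toList || PySem.Chars.startswith stripped "class ".toList ||
          PySem.Chars.startswith stripped "if ".toList || PySem.Chars.startswith stripped "import ".toList ||
          PySem.Chars.startswith stripped "from ".toList ||
          (!(PySem.Chars.endswith stripped ":".toList) && PySem.Chars.isIn "=".toList stripped)) then
        pvLoopA rest (acc ++ [line]) false brace'
      else
        pvLoopA rest acc true brace'
    else
      pvLoopA rest (acc ++ [line]) false brace

def remove_conflicting_config_py (script : String) : String :=
  String.ofList (PySem.Chars.join "\n".toList (pvLoopA (PySem.Chars.splitOn script.toList "\n".toList) [] false 0))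

-- ===== PORT B =====
def pvTrig (stripped : List Char) : Bool :=
  PySem.Chars.startswith stripped "AWS_CONFIG".toList ||
  PySem.Chars.startswith stripped "SNOWFLAKE_CONFIG".toList ||
  PySem.Chars.startswith stripped "CONFIG_VALID".toList ||
  PySem.Chars.isIn "validate_config".toList stripped

def pvTerm (stripped : List Char) : Bool :=
  !(stripped == []) && !(PySem.Chars.startswith stripped "#".toList) &&
  (PySem.Chars.startswith stripped "def ".toList || PySem.Chars.startswith stripped "class ".toList ||
   PySem.Chars.startswith stripped "if ".toList || PySem.Chars.startswith stripped "import ".toList ||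
   PySem.Chars.startswith stripped "from ".toList ||
   (!(PySem.Chars.endswith stripped ":".toList) && PySem.Chars.isIn "=".toList stripped))

-- segments[-1].append(line)
def pvAppendLast : List (List (List Char)) → List Char → List (List (List Char))
  | [], l => [[l]]
  | [s], l => [s ++ [l]]
  | s :: ss, l => s :: pvAppendLast ss l

-- _split_at_triggers: for-loop over lines building the segment list
def pvSegs (lines : List (List Char)) : List (List (List Char)) :=
  lines.foldl (fun segs line => if pvTrig (PySem.Chars.strip line) then segs ++ [[]] else pvAppendLast segs line) [[]]

-- _kept_suffix: for-loop with running balance; 'return segment[j:]' is 'line :: rest'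
def pvKeep : List (List Char) → Int → List (List Char)
  | [], _ => []
  | line :: rest, bal =>
    let bal' := bal + (PySem.Chars.count line "{".toList : Int) - (PySem.Chars.count line "}".toList : Int)
    if decide (bal' ≤ 0) && pvTerm (PySem.Chars.strip line) then line :: rest
    else pvKeep rest bal'

def remove_conflicting_config_py_alt (script : String) : String :=
  String.ofList (PySem.Chars.join "\n".toList
    (match pvSegs (PySem.Chars.splitOn script.toList "\n".toList) with
     | [] => []
     | s0 :: ss => ss.foldl (fun out seg => out ++ pvKeep seg 0) s0))

-- ===== PRECONDITION & SPEC =====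
def Spec_remove_conflicting_config_py (script : String) (out : String) : Prop := out = remove_conflicting_config_py_alt script
instance (script : String) (out : String) : Decidable (Spec_remove_conflicting_config_py script out) := by unfold Spec_remove_conflicting_config_py; infer_instance

-- ===== CLAIM (what is proved, stated in full; the proofs are below) =====
def Claim_equal_remove_conflicting_config_py : Prop := ∀ (script : String), Dom_remove_conflicting_config_py script → Spec_remove_conflicting_config_py script (remove_conflicting_config_py script)

-- ===== LEMMAS AND PROOFS =====
-- proof-side recursive characterisation of the segmentation: (first segment, later segments)
def pvSegR : List (List Char) → List (List Char) × List (List (List Char))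
  | [] => ([], [])
  | l :: rest =>
    if pvTrig (PySem.Chars.strip l) then ([], (pvSegR rest).1 :: (pvSegR rest).2)
    else (l :: (pvSegR rest).1, (pvSegR rest).2)

def pvFlatKeep (ss : List (List (List Char))) : List (List Char) :=
  ss.flatMap (fun s => pvKeep s 0)

theorem pvAppendLast_snoc (init : List (List (List Char))) (last : List (List Char)) (l : List Char) :
    pvAppendLast (init ++ [last]) l = init ++ [last ++ [l]] := by
  induction init with
  | nil => simp [pvAppendLast]
  | cons s ss ih =>
    cases ss with
    | nil => simp [pvAppendLast]
    | cons t ts =>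
      simp only [List.cons_append] at ih
      simp only [List.cons_append, pvAppendLast]
      rw [ih]

theorem pvSegs_invariant : ∀ (ls : List (List Char)) (init : List (List (List Char))) (last : List (List Char)),
    ls.foldl (fun segs line => if pvTrig (PySem.Chars.strip line) then segs ++ [[]] else pvAppendLast segs line) (init ++ [last])
      = init ++ ((last ++ (pvSegR ls).1) :: (pvSegR ls).2) := by
  intro ls
  induction ls with
  | nil => intro init last; simp [pvSegR]
  | cons l rest ih =>
    intro init last
    simp only [List.foldl_cons]
    by_cases ht : pvTrig (PySem.Chars.strip l) = true
    · rw [if_pos ht]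
      have := ih (init ++ [last]) []
      simp only [List.append_assoc] at this ⊢
      rw [this]
      simp [pvSegR, ht]
    · rw [if_neg ht, pvAppendLast_snoc, ih init (last ++ [l])]
      simp [pvSegR, ht]

theorem pvSegs_eq (ls : List (List Char)) : pvSegs ls = (pvSegR ls).1 :: (pvSegR ls).2 := by
  have := pvSegs_invariant ls [] []
  simpa [pvSegs] using this

theorem pvFoldAppend (ss : List (List (List Char))) : ∀ (s0 : List (List Char)),
    ss.foldl (fun out seg => out ++ pvKeep seg 0) s0 = s0 ++ pvFlatKeep ss := by
  induction ss with
  | nil => intro s0; simp [pvFlatKeep]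
  | cons s ss ih => intro s0; simp [pvFlatKeep, ih, List.flatMap_cons]

-- A's inlined conditions are definitionally pvTrig / pvTerm; restate the A-loop step with those names.
theorem pvLoopA_cons (line : List Char) (rest acc : List (List Char)) (skip : Bool) (brace : Int) :
    pvLoopA (line :: rest) acc skip brace =
      if pvTrig (PySem.Chars.strip line) then pvLoopA rest acc true 0
      else if skip then
        (if decide ((brace + (PySem.Chars.count line "{".toList : Int) - (PySem.Chars.count line "}".toList : Int)) ≤ 0) && pvTerm (PySem.Chars.strip line) then
          pvLoopA rest (acc ++ [line]) false (brace + (PySem.Chars.count line "{".toList : Int) - (PySem.Chars.count line "}".toList : Int))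
        else pvLoopA rest acc true (brace + (PySem.Chars.count line "{".toList : Int) - (PySem.Chars.count line "}".toList : Int)))
      else pvLoopA rest (acc ++ [line]) false brace := by
  simp only [pvLoopA, pvTrig, pvTerm, Bool.and_assoc]

theorem pvLoop_eq : ∀ (ls : List (List Char)),
    (∀ (acc : List (List Char)) (b : Int),
      pvLoopA ls acc false b = acc ++ (pvSegR ls).1 ++ pvFlatKeep (pvSegR ls).2) ∧
    (∀ (acc : List (List Char)) (b : Int),
      pvLoopA ls acc true b = acc ++ pvKeep (pvSegR ls).1 b ++ pvFlatKeep (pvSegR ls).2) := by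
  intro ls
  induction ls with
  | nil =>
    exact ⟨fun acc b => by simp [pvLoopA, pvSegR, pvFlatKeep],
           fun acc b => by simp [pvLoopA, pvSegR, pvKeep, pvFlatKeep]⟩
  | cons line rest ih =>
    refine ⟨fun acc b => ?_, fun acc b => ?_⟩
    · rw [pvLoopA_cons]
      by_cases ht : pvTrig (PySem.Chars.strip line) = true
      · rw [if_pos ht, ih.2 acc 0]
        simp [pvSegR, ht, pvFlatKeep, List.flatMap_cons]
      · rw [if_neg ht, if_neg (by simp), ih.1 (acc ++ [line]) b]
        simp [pvSegR, ht]
    · rw [pvLoopA_cons]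
      by_cases ht : pvTrig (PySem.Chars.strip line) = true
      · rw [if_pos ht, ih.2 acc 0]
        simp [pvSegR, ht, pvKeep, pvFlatKeep, List.flatMap_cons]
      · rw [if_neg ht, if_pos rfl]
        by_cases hc : (decide ((b + (PySem.Chars.count line "{".toList : Int) - (PySem.Chars.count line "}".toList : Int)) ≤ 0)
                        && pvTerm (PySem.Chars.strip line)) = true
        · rw [if_pos hc, ih.1 (acc ++ [line]) _]
          simp only [pvSegR, if_neg ht, pvKeep]
          rw [if_pos hc]
          simp
        · rw [if_neg hc, ih.2 acc _]
          simp only [pvSegR, if_neg ht, pvKeep]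
          rw [if_neg hc]

-- ===== VERDICT (by name: the statement is the Claim_ definition above) =====
theorem remove_conflicting_config_py_spec : Claim_equal_remove_conflicting_config_py := by
  intro script _
  unfold Spec_remove_conflicting_config_py remove_conflicting_config_py remove_conflicting_config_py_alt
  rw [(pvLoop_eq (PySem.Chars.splitOn script.toList "\n".toList)).1 [] 0, pvSegs_eq]
  simp only [pvFoldAppend]
  simp [pvFlatKeep, List.flatMap_def]
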